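-- pv_equiv track=rewrite | github.com/TayTroye/RecPolit | dataset.py | _analyze_session_type
-- ===== SOURCE A (Python) =====
-- def _analyze_session_type(session):
--     actions = [act for act, _ in session]  # 提取所有动作
--     purchase_cnt = sum(act == "alipay" for act in actions)  # 计算 'alipay' 出现的次数
--
--     if purchase_cnt == 0:
--         return "no_alipay"
--
--     if purchase_cnt != 1:
--         return "invalid"
--
--     purchase_idx = next(
--         i for i, act in enumerate(actions) if act == "alipay"
--     )
--
--     has_click_before = any(
--         actions[i] != "alipay" for i in range(purchase_idx)
--     )
--
--     unique_items = {
--         session[i][1] for i in range(purchase_idx + 1)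
--     }
--
--     if not has_click_before or len(unique_items) < 2:
--         return "invalid"
--
--     return "valid_purchase"
-- ===== SOURCE B (Python) =====
-- def _analyze_session_type(session):
--     alipay_cnt = 0
--     has_click_before = False
--     unique_items = set()
--     for act, item in session:
--         if act == "alipay":
--             if alipay_cnt == 0:
--                 unique_items.add(item)
--             alipay_cnt += 1
--         elif alipay_cnt == 0:
--             has_click_before = True
--             unique_items.add(item)
--     if alipay_cnt == 0:
--         return "no_alipay"
--     if alipay_cnt != 1:
--         return "invalid"
--     if not has_click_before or len(unique_items) < 2:
--         return "invalid"
--     return "valid_purchase"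
-- ===== Notes on version B (the rewrite author's own statement) =====
-- stated objective: simpler
-- what changed: Replaces A's four separate passes (list-comprehension, count, index search, any, set comprehension) by one loop that tracks an alipay counter, a clicked-before flag and the unique-item set up to the first alipay.
import Mathlib
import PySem

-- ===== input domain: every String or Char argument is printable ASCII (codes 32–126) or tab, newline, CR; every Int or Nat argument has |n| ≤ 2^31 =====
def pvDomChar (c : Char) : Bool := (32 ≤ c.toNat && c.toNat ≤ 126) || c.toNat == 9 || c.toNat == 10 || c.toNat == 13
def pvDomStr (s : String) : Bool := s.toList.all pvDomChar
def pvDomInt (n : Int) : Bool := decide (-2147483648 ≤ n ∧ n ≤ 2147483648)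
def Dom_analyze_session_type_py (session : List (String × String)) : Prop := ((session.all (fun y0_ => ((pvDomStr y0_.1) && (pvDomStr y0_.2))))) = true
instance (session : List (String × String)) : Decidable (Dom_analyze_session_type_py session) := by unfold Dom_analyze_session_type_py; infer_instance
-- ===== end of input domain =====

-- B replaces A's four separate passes over the session (action list, count, index search,
-- any, set comprehension) by one loop tracking a counter, a flag and the unique-item set: simpler.

-- ===== PORT A =====
-- 'next(i for i, act in enumerate(actions) if act == "alipay")': first index of "alipay";
-- only evaluated when purchase_cnt == 1, so the StopIteration branch is unreachable there
-- (the [] case below is arbitrary and never hit under that guard).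
def firstAlipayIdx : List String → Nat
  | [] => 0
  | a :: rest => if a == "alipay" then 0 else firstAlipayIdx rest + 1

def analyze_session_type_py (session : List (String × String)) : String :=
  let actions := session.map (fun p => p.1)
  let purchase_cnt : Int := (actions.map (fun act => if act == "alipay" then (1 : Int) else 0)).sum
  if purchase_cnt == 0 then "no_alipay"
  else if !(purchase_cnt == 1) then "invalid"
  else
    let purchase_idx := firstAlipayIdx actions
    let has_click_before := (List.range purchase_idx).any (fun i => !(actions.getD i "" == "alipay"))
    let unique_items := PySem.Set.ofList ((List.range (purchase_idx + 1)).map (fun i => (session.getD i ("", "")).2))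
    if !has_click_before || PySem.Set.len unique_items < 2 then "invalid"
    else "valid_purchase"

-- ===== PORT B =====
-- state: (alipay_cnt, has_click_before, unique_items)
def altStep (st : Int × Bool × PySem.Set String) (p : String × String) : Int × Bool × PySem.Set String :=
  if p.1 == "alipay" then
    (st.1 + 1, st.2.1, if st.1 == 0 then PySem.Set.add st.2.2 p.2 else st.2.2)
  else if st.1 == 0 then (st.1, true, PySem.Set.add st.2.2 p.2)
  else st

def analyze_session_type_py_alt (session : List (String × String)) : String :=
  let st := session.foldl altStep ((0 : Int), false, PySem.Set.empty)
  if st.1 == 0 then "no_alipay"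
  else if !(st.1 == 1) then "invalid"
  else if !st.2.1 || PySem.Set.len st.2.2 < 2 then "invalid"
  else "valid_purchase"

-- ===== PRECONDITION & SPEC =====
def Spec_analyze_session_type_py (session : List (String × String)) (out : String) : Prop := out = analyze_session_type_py_alt session
instance (session : List (String × String)) (out : String) : Decidable (Spec_analyze_session_type_py session out) := by unfold Spec_analyze_session_type_py; infer_instance

-- ===== CLAIM (what is proved, stated in full; the proofs are below) =====
def Claim_equal_analyze_session_type_py : Prop := ∀ (session : List (String × String)), Dom_analyze_session_type_py session → Spec_analyze_session_type_py session (analyze_session_type_py session)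

-- ===== LEMMAS AND PROOFS =====

-- count invariant of B's fold: first component = initial counter + number of "alipay" actions
theorem foldl_altStep_fst (s : List (String × String)) : ∀ (c : Int) (h : Bool) (it : PySem.Set String),
    (s.foldl altStep (c, h, it)).1 = c + (s.countP (fun p => p.1 == "alipay") : Int) := by
  induction s with
  | nil => intro c h it; simp
  | cons p rest ih =>
    intro c h it
    by_cases hp : (p.1 == "alipay") = true
    · simp only [List.foldl_cons, altStep, hp, if_true, List.countP_cons]
      rw [ih]; push_cast; ring
    · simp only [List.foldl_cons, altStep, hp, List.countP_cons]
      by_cases hc : (c == 0) = true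
      · simp only [hc, if_true]; rw [ih]; simp
      · simp only [hc]; rw [ih]; simp

-- B's fold over an alipay-free prefix, started with counter 0
theorem foldl_altStep_pre (s : List (String × String)) :
    ∀ (b : Bool) (it : PySem.Set String), (∀ p ∈ s, (p.1 == "alipay") = false) →
    s.foldl altStep ((0 : Int), b, it)
      = ((0 : Int), b || !s.isEmpty, (s.map (fun p => p.2)).foldl PySem.Set.add it) := by
  induction s with
  | nil => intro b it _; simp
  | cons p rest ih =>
    intro b it hfree
    have hp : (p.1 == "alipay") = false := hfree p (by simp)
    simp only [List.foldl_cons, altStep, hp, Bool.false_eq_true, if_false, beq_self_eq_true, if_true,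
      List.map_cons]
    rw [ih true (PySem.Set.add it p.2) (fun q hq => hfree q (by simp [hq]))]
    simp

-- B's fold once the counter is positive: flag and set never change again
theorem foldl_altStep_post (s : List (String × String)) :
    ∀ (c : Int) (h : Bool) (it : PySem.Set String), 1 ≤ c →
    s.foldl altStep (c, h, it) = (c + (s.countP (fun p => p.1 == "alipay") : Int), h, it) := by
  induction s with
  | nil => intro c h it _; simp
  | cons p rest ih =>
    intro c h it hc
    have hc0 : (c == 0) = false := by simp; omega
    by_cases hp : (p.1 == "alipay") = true
    · simp only [List.foldl_cons, altStep, hp, if_true, hc0, Bool.false_eq_true, if_false,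
        List.countP_cons]
      rw [ih (c + 1) h it (by omega)]
      have he : c + 1 + (List.countP (fun p => p.1 == "alipay") rest : Int)
          = c + ((List.countP (fun p => p.1 == "alipay") rest + 1 : Nat) : Int) := by push_cast; ring
      rw [he]
    · simp only [List.foldl_cons, altStep, hp, Bool.false_eq_true, if_false, hc0,
        List.countP_cons]
      rw [ih c h it hc]
      simp

-- a session with exactly one "alipay" splits as prefix / the alipay row / suffix
theorem split_of_countP_one (s : List (String × String))
    (h1 : s.countP (fun p => p.1 == "alipay") = 1) :
    ∃ pre x post, s = pre ++ ("alipay", x) :: post ∧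
      (∀ p ∈ pre, (p.1 == "alipay") = false) ∧
      post.countP (fun p => p.1 == "alipay") = 0 := by
  induction s with
  | nil => simp at h1
  | cons p rest ih =>
    by_cases hp : (p.1 == "alipay") = true
    · refine ⟨[], p.2, rest, ?_, by simp, ?_⟩
      · have : p.1 = "alipay" := by exact eq_of_beq hp
        simp [← this]
      · rw [List.countP_cons] at h1; simp only [hp, if_true] at h1; omega
    · simp only [List.countP_cons, hp, Bool.false_eq_true, if_false, Nat.add_zero] at h1
      obtain ⟨pre, x, post, hs, hpre, hpost⟩ := ih h1
      exact ⟨p :: pre, x, post, by simp [hs], by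
        intro q hq
        rcases List.mem_cons.mp hq with h | h
        · simpa [h] using hp
        · exact hpre q h, hpost⟩

-- the index-comprehension [l[i] for i in range(n)] is take n
theorem map_range_getD {α : Type} (l : List α) (d : α) :
    ∀ n, n ≤ l.length → (List.range n).map (fun i => l.getD i d) = l.take n := by
  intro n hn
  induction n with
  | zero => simp
  | succ m ih =>
    rw [List.range_succ, List.map_append, ih (by omega)]
    have hm : m < l.length := by omega
    rw [List.take_add_one]
    simp [List.getD, List.getElem?_eq_getElem hm]

theorem firstAlipayIdx_append (pre : List String) (rest : List String)
    (h : ∀ a ∈ pre, (a == "alipay") = false) :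
    firstAlipayIdx (pre ++ "alipay" :: rest) = pre.length := by
  induction pre with
  | nil => simp [firstAlipayIdx]
  | cons a t ih =>
    have ha := h a (by simp)
    simp only [List.cons_append, firstAlipayIdx, ha, Bool.false_eq_true, if_false, List.length_cons]
    rw [ih (fun b hb => h b (by simp [hb]))]

theorem any_range_of_true (n : Nat) (f : Nat → Bool) (h : ∀ i < n, f i = true) :
    (List.range n).any f = decide (0 < n) := by
  cases n with
  | zero => simp
  | succ m =>
    rw [List.any_eq_true.mpr ⟨0, by simp, h 0 (by omega)⟩]
    simp

-- ===== VERDICT (by name: the statement is the Claim_ definition above) =====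
theorem analyze_session_type_py_spec : Claim_equal_analyze_session_type_py := by
  intro session _dom
  unfold Spec_analyze_session_type_py
  have hcntA : ((session.map (fun p => p.1)).map (fun act => if act == "alipay" then (1 : Int) else 0)).sum
      = (session.countP (fun p => p.1 == "alipay") : Int) := by
    rw [PySem.List.sum_map_ite_one_zero, List.countP_map]
    rfl
  by_cases h0 : session.countP (fun p => p.1 == "alipay") = 0
  · -- both return "no_alipay"
    simp only [analyze_session_type_py, analyze_session_type_py_alt]
    rw [hcntA, foldl_altStep_fst, h0]
    norm_num
  · by_cases h1 : session.countP (fun p => p.1 == "alipay") = 1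
    · -- the interesting case: exactly one alipay
      obtain ⟨pre, x, post, hs, hpre, hpost⟩ := split_of_countP_one session h1
      -- B side: the fold's final state
      have hB : session.foldl altStep ((0 : Int), false, PySem.Set.empty)
          = ((1 : Int), !pre.isEmpty,
             PySem.Set.add ((pre.map (fun p => p.2)).foldl PySem.Set.add PySem.Set.empty) x) := by
        rw [hs, List.foldl_append, foldl_altStep_pre pre false PySem.Set.empty hpre,
          List.foldl_cons]
        simp only [altStep, beq_self_eq_true, if_true, Bool.false_or]
        norm_num
        rw [foldl_altStep_post post 1 (!pre.isEmpty) _ (by omega), hpost]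
        simp
      -- A side pieces
      have hact : session.map (fun p => p.1)
          = (pre.map (fun p => p.1)) ++ "alipay" :: (post.map (fun p => p.1)) := by
        simp [hs]
      have hidx : firstAlipayIdx (session.map (fun p => p.1)) = pre.length := by
        rw [hact, firstAlipayIdx_append _ _ (by
          intro a ha
          obtain ⟨p, hp, rfl⟩ := List.mem_map.mp ha
          exact hpre p hp)]
        simp
      have hclick : (List.range pre.length).any
          (fun i => !((session.map (fun p => p.1)).getD i "" == "alipay")) = decide (0 < pre.length) := by
        apply any_range_of_true
        intro i hi
        have hlen : i < (pre.map (fun p => p.1)).length := by simpa using hi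
        rw [hact, List.getD_append _ _ _ _ hlen, List.getD_eq_getElem _ _ hlen]
        obtain ⟨p, hp, he⟩ := List.mem_map.mp (List.getElem_mem hlen)
        rw [← he]
        simp [hpre p hp]
      have hset : PySem.Set.ofList ((List.range (pre.length + 1)).map (fun i => (session.getD i ("", "")).2))
          = PySem.Set.add ((pre.map (fun p => p.2)).foldl PySem.Set.add PySem.Set.empty) x := by
        have hfun : (fun i => (session.getD i ("", "")).2)
            = (fun q : String × String => q.2) ∘ (fun i => session.getD i ("", "")) := rfl
        have hitems : (List.range (pre.length + 1)).map (fun i => (session.getD i ("", "")).2)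
            = (pre.map (fun p => p.2)) ++ [x] := by
          rw [hfun, ← List.map_map,
            map_range_getD session ("", "") (pre.length + 1) (by simp [hs]), hs]
          simp [List.take_append]
        rw [hitems, PySem.Set.ofList_eq_foldl, List.foldl_append]
        rfl
      have hemp : (!pre.isEmpty) = decide (0 < pre.length) := by
        cases pre <;> simp
      simp only [analyze_session_type_py, analyze_session_type_py_alt]
      rw [hcntA, h1, hB, hidx, hclick, hset, hemp]
      norm_num
    · -- purchase_cnt ≥ 2: both return "invalid"
      have hb0 : ((session.countP (fun p => p.1 == "alipay") : Int) == 0) = false :=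
        beq_eq_false_iff_ne.mpr (by exact_mod_cast h0)
      have hb1 : ((session.countP (fun p => p.1 == "alipay") : Int) == 1) = false :=
        beq_eq_false_iff_ne.mpr (by exact_mod_cast h1)
      simp only [analyze_session_type_py, analyze_session_type_py_alt]
      rw [hcntA, foldl_altStep_fst]
      simp [hb0, hb1]
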